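-- pv_equiv track=rewrite | github.com/drmikehenry/findx | src/findx.py | joined_lines
-- ===== SOURCE A (Python) =====
-- import typing as T
--
-- def split_leading_whitespace(s: str) -> T.Tuple[str, str]:
--     rest = s.lstrip()
--     leading_whitespace = s[: -len(rest)]
--     return leading_whitespace, rest
--
-- def joined_lines(lines: T.List[str]) -> T.Iterator[str]:
--     current_line = None
--     for line in lines:
--         line = line.rstrip()
--         leading_whitespace, rest = split_leading_whitespace(line)
--         if current_line and leading_whitespace:
--             if rest.startswith("+"):
--                 current_line += rest[1:]
--             else:
--                 current_line += " " + rest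
--         else:
--             if current_line is not None:
--                 yield current_line
--             current_line = line
--     if current_line is not None:
--         yield current_line
-- ===== SOURCE B (Python) =====
-- def joined_lines(lines):
--     # Phase 1: group the rstripped lines; a line continues the open group iff
--     # that group's head line is non-empty and the line starts with whitespace.
--     groups = []
--     for raw in lines:
--         line = raw.rstrip()
--         if groups and groups[-1][0] and line[:1].isspace():
--             groups[-1].append(line)
--         else:
--             groups.append([line])
--     # Phase 2: fold each group into one string.
--     for g in groups:
--         out = g[0]
--         for cont in g[1:]:
--             rest = cont.lstrip()
--             out += rest[1:] if rest.startswith("+") else " " + rest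
--         yield out
-- ===== Notes on version B (the rewrite author's own statement) =====
-- stated objective: alternative
-- what changed: Replaces A's single generator pass with one mutable current-line accumulator by a two-phase build-then-fold structure: phase 1 groups the rstripped lines into a list of groups, phase 2 folds each group into its joined string.
import Mathlib
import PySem

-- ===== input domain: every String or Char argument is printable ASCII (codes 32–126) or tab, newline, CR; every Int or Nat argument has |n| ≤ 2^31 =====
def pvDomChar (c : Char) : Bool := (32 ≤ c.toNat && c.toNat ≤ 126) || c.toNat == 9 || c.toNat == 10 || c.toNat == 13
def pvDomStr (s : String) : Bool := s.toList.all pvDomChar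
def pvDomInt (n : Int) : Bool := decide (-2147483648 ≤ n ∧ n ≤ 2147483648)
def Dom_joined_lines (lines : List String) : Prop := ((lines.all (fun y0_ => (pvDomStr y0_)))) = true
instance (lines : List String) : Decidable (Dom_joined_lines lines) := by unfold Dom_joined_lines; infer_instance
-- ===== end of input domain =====

-- B replaces A's single accumulator-driven generator pass by a build-then-fold
-- decomposition: first group the rstripped lines, then fold each group into one
-- string (objective: alternative decomposition, same cost).

-- ===== PORT A =====
def split_leading_whitespace (s : String) : String × String :=
  let rest := PySem.Str.lstrip s
  let leading_whitespace := PySem.Str.slice s none (some (-(PySem.Str.len rest)))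
  (leading_whitespace, rest)

-- one iteration of A's for-loop: state = (lines yielded so far, current_line)
def jlStepA (st : List String × Option String) (rawLine : String) : List String × Option String :=
  let line := PySem.Str.rstrip rawLine
  let lwr := split_leading_whitespace line
  match st with
  | (out, some c) =>
    if c ≠ "" ∧ lwr.1 ≠ "" then
      (out, some (c ++ (if PySem.Str.startswith lwr.2 "+" then PySem.Str.slice lwr.2 (some 1) none else " " ++ lwr.2)))
    else
      (out ++ [c], some line)
  | (out, none) => (out, some line)

def joined_lines (lines : List String) : List String :=
  match lines.foldl jlStepA ([], none) with
  | (out, some c) => out ++ [c]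
  | (out, none) => out

-- ===== PORT B =====
-- phase 1 step: a line continues the open group iff that group's head is
-- non-empty and the (rstripped) line starts with whitespace
def jl_groupStep (groups : List (List String)) (raw : String) : List (List String) :=
  let line := PySem.Str.rstrip raw
  if ((match groups.getLast? with
       | some g => decide (g.headD "" ≠ "")
       | none => false)
      && PySem.Str.strIsspace (PySem.Str.slice line none (some 1))) then
    groups.dropLast ++ [groups.getLast?.getD [] ++ [line]]
  else
    groups ++ [[line]]

-- phase 2: fold one group into its joined string
def jl_render (g : List String) : String :=
  (g.drop 1).foldl
    (fun out cont =>
      let rest := PySem.Str.lstrip cont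
      out ++ (if PySem.Str.startswith rest "+" then PySem.Str.slice rest (some 1) none else " " ++ rest))
    (g.headD "")

def joined_lines_alt (lines : List String) : List String :=
  (lines.foldl jl_groupStep []).map jl_render

-- ===== PRECONDITION & SPEC =====
def Spec_joined_lines (lines : List String) (out : List String) : Prop := out = joined_lines_alt lines
instance (lines : List String) (out : List String) : Decidable (Spec_joined_lines lines out) := by unfold Spec_joined_lines; infer_instance

-- ===== CLAIM (what is proved, stated in full; the proofs are below) =====
def Claim_equal_joined_lines : Prop := ∀ (lines : List String), Dom_joined_lines lines → Spec_joined_lines lines (joined_lines lines)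

-- ===== LEMMAS AND PROOFS =====

-- finish of A's generator: yield current_line if it is not None
def finishA : List String × Option String → List String
  | (out, some c) => out ++ [c]
  | (out, none) => out

theorem joined_lines_eq_finishA (lines : List String) :
    joined_lines lines = finishA (lines.foldl jlStepA ([], none)) := by
  unfold joined_lines
  rcases lines.foldl jlStepA ([], none) with ⟨o, _ | c⟩ <;> rfl

theorem stepA_out (out : List String) (c : Option String) (raw : String) :
    jlStepA (out, c) raw = (out ++ (jlStepA ([], c) raw).1, (jlStepA ([], c) raw).2) := by
  rcases c with _ | c
  · simp [jlStepA]
  · simp only [jlStepA]; split <;> simp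

theorem foldlA_out (ls : List String) (out : List String) (c : Option String) :
    ls.foldl jlStepA (out, c) =
      (out ++ (ls.foldl jlStepA ([], c)).1, (ls.foldl jlStepA ([], c)).2) := by
  induction ls generalizing out c with
  | nil => simp
  | cons raw ls ih =>
    simp only [List.foldl_cons]
    rcases h : jlStepA ([], c) raw with ⟨p1, p2⟩
    rw [stepA_out out c raw, h]
    rw [ih (out ++ p1) p2, ih p1 p2]
    simp [List.append_assoc]

theorem finishA_out (ls : List String) (out : List String) (c : Option String) :
    finishA (ls.foldl jlStepA (out, c)) = out ++ finishA (ls.foldl jlStepA ([], c)) := by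
  rw [foldlA_out]
  rcases h : ls.foldl jlStepA ([], c) with ⟨o2, _ | c2⟩ <;> simp [finishA]

theorem stepB_ne_nil (gs : List (List String)) (raw : String) :
    jl_groupStep gs raw ≠ [] := by
  intro hnil
  unfold jl_groupStep at hnil
  split at hnil
  · dsimp only [] at hnil; split at hnil <;> simp at hnil
  · simp at hnil

theorem stepB_frozen (gs gs' : List (List String)) (raw : String) (h : gs' ≠ []) :
    jl_groupStep (gs ++ gs') raw = gs ++ jl_groupStep gs' raw := by
  unfold jl_groupStep
  rw [List.getLast?_append, List.dropLast_append_of_ne_nil h]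
  rcases gs'.getLast?.eq_none_or_eq_some with h2 | ⟨g, h2⟩
  · exact absurd (List.getLast?_eq_none_iff.mp h2) h
  · rw [h2]; simp only [Option.some_or, Option.getD_some]
    split <;> simp

theorem foldlB_frozen (ls : List String) (gs gs' : List (List String)) (h : gs' ≠ []) :
    ls.foldl jl_groupStep (gs ++ gs') = gs ++ ls.foldl jl_groupStep gs' := by
  induction ls generalizing gs' with
  | nil => rfl
  | cons raw ls ih =>
    simp only [List.foldl_cons]
    rw [stepB_frozen gs gs' raw h, ih _ (stepB_ne_nil gs' raw)]

-- last char of a Python-rstripped string is never whitespace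
theorem rstrip_getLast_not_space (xs : List Char) (c : Char)
    (h : (PySem.Chars.rstrip xs).getLast? = some c) : PySem.Chars.isspace c = false := by
  unfold PySem.Chars.rstrip at h
  rw [List.getLast?_reverse] at h
  rcases hd : (xs.reverse.dropWhile PySem.Chars.isspace) with _ | ⟨a, t⟩
  · rw [hd] at h; simp at h
  · rw [hd] at h
    simp only [List.head?_cons, Option.some.injEq] at h
    subst h
    have := List.head_dropWhile_not PySem.Chars.isspace (l := xs.reverse)
    rw [hd] at this
    simpa using this (by simp)

-- python slice s[:-k] for 0 < k ≤ len s is take (len s - k)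
theorem slice_neg_take {α : Type} (xs : List α) (k : Nat) (hk : k ≤ xs.length) (hkpos : 0 < k) :
    PySem.List.slice xs none (some (-(k : Int))) = xs.take (xs.length - k) := by
  unfold PySem.List.slice PySem.List.clampIdx
  have h2 : (-(k : Int) < 0) := by omega
  have h1 : ¬((xs.length : Int) + -(k : Int) < 0) := by omega
  have h3 : ((xs.length : Int) + -(k : Int)).toNat = xs.length - k := by omega
  simp [h1, h3, hkpos]

-- A's "leading_whitespace is truthy" test ≡ B's "line[:1].isspace()" test, at the
-- List Char level, for a list whose last element is not whitespace
theorem cond_equiv_chars (l : List Char)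
    (hlast : ∀ c, l.getLast? = some c → PySem.Chars.isspace c = false) :
    (PySem.Chars.slice l none (some (-((PySem.Chars.lstrip l).length : Int))) ≠ []) ↔
      PySem.Chars.strIsspace (PySem.Chars.slice l none (some 1)) = true := by
  simp only [PySem.Chars.slice_eq_listSlice]
  rcases l with _ | ⟨c, t⟩
  · simp [PySem.List.slice, PySem.Chars.strIsspace, PySem.Chars.lstrip]
  · have hslice1 : PySem.List.slice (c :: t) none (some 1) = [c] := by
      rw [show (1 : Int) = ((1 : Nat) : Int) from rfl, PySem.List.slice_to _ (by omega)]
      simp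
    by_cases hc : PySem.Chars.isspace c = true
    · have hrest : PySem.Chars.lstrip (c :: t) = t.dropWhile PySem.Chars.isspace := by
        simp [PySem.Chars.lstrip, hc]
      have hlen : (PySem.Chars.lstrip (c :: t)).length ≤ t.length := by
        rw [hrest]; exact List.length_dropWhile_le _ _
      have hne : PySem.Chars.lstrip (c :: t) ≠ [] := by
        intro hnil
        have hall : ∀ x ∈ c :: t, PySem.Chars.isspace x = true :=
          List.dropWhile_eq_nil_iff.mp (by simpa [PySem.Chars.lstrip] using hnil)
        have hfalse := hlast _ (List.getLast?_eq_some_getLast (l := c :: t) (by simp))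
        rw [hall _ (List.getLast_mem (by simp))] at hfalse
        cases hfalse
      have hpos : 0 < (PySem.Chars.lstrip (c :: t)).length := List.length_pos_of_ne_nil hne
      have hslice2 : PySem.List.slice (c :: t) none
          (some (-((PySem.Chars.lstrip (c :: t)).length : Int))) =
          (c :: t).take ((c :: t).length - (PySem.Chars.lstrip (c :: t)).length) :=
        slice_neg_take (c :: t) _ (by simp; omega) hpos
      rw [hslice1, hslice2]
      constructor
      · intro _
        simp [PySem.Chars.strIsspace, hc]
      · intro _ hnil
        rw [List.take_eq_nil_iff] at hnil
        rcases hnil with hnil | hnil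
        · simp only [List.length_cons] at hnil; omega
        · cases hnil
    · have hrest : PySem.Chars.lstrip (c :: t) = c :: t := by
        simp [PySem.Chars.lstrip, hc]
      have hslice2 : PySem.List.slice (c :: t) none
          (some (-((PySem.Chars.lstrip (c :: t)).length : Int))) =
          (c :: t).take ((c :: t).length - (PySem.Chars.lstrip (c :: t)).length) :=
        slice_neg_take (c :: t) _ (by rw [hrest]) (by rw [hrest]; simp)
      rw [hslice1, hslice2, hrest]
      simp [PySem.Chars.strIsspace, hc]

-- the same equivalence lifted to the String level of the ports
theorem cond_equiv (raw : String) :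
    ((split_leading_whitespace (PySem.Str.rstrip raw)).1 ≠ "") ↔
      PySem.Str.strIsspace (PySem.Str.slice (PySem.Str.rstrip raw) none (some 1)) = true := by
  have h := cond_equiv_chars (PySem.Chars.rstrip raw.toList) (rstrip_getLast_not_space raw.toList)
  unfold split_leading_whitespace
  simp only [ne_eq, ← String.toList_inj, PySem.Str.toList_slice, PySem.Str.toList_lstrip,
    PySem.Str.toList_rstrip, PySem.Str.strIsspace_eq, PySem.Str.len_eq, String.toList_empty,
    PySem.Chars.slice_eq_listSlice] at h ⊢
  exact h

theorem append_ne_empty (s t : String) (h : s ≠ "") : s ++ t ≠ "" := by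
  simp only [ne_eq, ← String.toList_inj, String.toList_append, String.toList_empty] at *
  simp [h]

theorem render_singleton (l : String) : jl_render [l] = l := by
  simp [jl_render]

theorem render_snoc (g : List String) (hg : g ≠ []) (l : String) :
    jl_render (g ++ [l]) =
      jl_render g ++ (if PySem.Str.startswith (PySem.Str.lstrip l) "+"
        then PySem.Str.slice (PySem.Str.lstrip l) (some 1) none
        else " " ++ PySem.Str.lstrip l) := by
  rcases g with _ | ⟨h, t⟩
  · exact absurd rfl hg
  · simp [jl_render, List.foldl_append]

-- main invariant: A finishing from (out = [], current = rendered open group)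
-- equals B's phase 2 applied to B's phase 1 started from that open group
theorem main_inv (ls : List String) (g : List String) (hg : g ≠ [])
    (hiff : jl_render g = "" ↔ g.headD "" = "") :
    finishA (ls.foldl jlStepA ([], some (jl_render g))) =
      (ls.foldl jl_groupStep [g]).map jl_render := by
  induction ls generalizing g with
  | nil => simp [finishA]
  | cons raw ls ih =>
    simp only [List.foldl_cons]
    have hcondAB : (jl_render g ≠ "" ∧ (split_leading_whitespace (PySem.Str.rstrip raw)).1 ≠ "")
        ↔ (((match ([g] : List (List String)).getLast? with
             | some g' => decide (g'.headD "" ≠ "")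
             | none => false)
            && PySem.Str.strIsspace (PySem.Str.slice (PySem.Str.rstrip raw) none (some 1))) = true) := by
      simp only [List.getLast?_singleton, Bool.and_eq_true, decide_eq_true_eq, ne_eq]
      constructor
      · rintro ⟨h1, h2⟩
        exact ⟨fun h => h1 (hiff.mpr h), (cond_equiv raw).mp h2⟩
      · rintro ⟨h1, h2⟩
        exact ⟨fun h => h1 (hiff.mp h), (cond_equiv raw).mpr h2⟩
    by_cases hc : jl_render g ≠ "" ∧ (split_leading_whitespace (PySem.Str.rstrip raw)).1 ≠ ""
    · -- continuation: extend current line / extend last group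
      have hstepA : jlStepA ([], some (jl_render g)) raw =
          ([], some (jl_render (g ++ [PySem.Str.rstrip raw]))) := by
        simp only [jlStepA, if_pos hc]
        rw [render_snoc g hg (PySem.Str.rstrip raw)]
        rfl
      have hstepB : jl_groupStep [g] raw = [g ++ [PySem.Str.rstrip raw]] := by
        simp only [jl_groupStep, if_pos (hcondAB.mp hc)]
        simp
      rw [hstepA, hstepB]
      apply ih
      · simp
      · have h1 : jl_render (g ++ [PySem.Str.rstrip raw]) ≠ "" := by
          rw [render_snoc g hg (PySem.Str.rstrip raw)]
          exact append_ne_empty _ _ hc.1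
        have h2 : (g ++ [PySem.Str.rstrip raw]).headD "" ≠ "" := by
          rcases g with _ | ⟨h, t⟩
          · exact absurd rfl hg
          · simpa using fun hh => hc.1 (hiff.mpr (by simpa using hh))
        constructor
        · intro h; exact absurd h h1
        · intro h; exact absurd h h2
    · -- new group: yield current line / start fresh group
      have hstepA : jlStepA ([], some (jl_render g)) raw =
          ([jl_render g], some (PySem.Str.rstrip raw)) := by
        simp only [jlStepA, if_neg hc]; rfl
      have hstepB : jl_groupStep [g] raw = [g] ++ [[PySem.Str.rstrip raw]] := by
        have : ¬ (((match ([g] : List (List String)).getLast? with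
             | some g' => decide (g'.headD "" ≠ "")
             | none => false)
            && PySem.Str.strIsspace (PySem.Str.slice (PySem.Str.rstrip raw) none (some 1))) = true) :=
          fun h => hc (hcondAB.mpr h)
        simp only [jl_groupStep, if_neg this]
      rw [hstepA, hstepB, finishA_out, foldlB_frozen ls [g] [[PySem.Str.rstrip raw]] (by simp)]
      have hih := ih [PySem.Str.rstrip raw] (by simp) (by simp [render_singleton])
      rw [render_singleton] at hih
      rw [hih]
      simp

-- ===== VERDICT (by name: the statement is the Claim_ definition above) =====
theorem joined_lines_spec : Claim_equal_joined_lines := by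
  intro lines _
  unfold Spec_joined_lines
  rcases lines with _ | ⟨raw, ls⟩
  · rfl
  · rw [joined_lines_eq_finishA]
    simp only [List.foldl_cons, joined_lines_alt]
    have hA : jlStepA ([], none) raw = ([], some (PySem.Str.rstrip raw)) := rfl
    have hB : jl_groupStep [] raw = [[PySem.Str.rstrip raw]] := by
      simp [jl_groupStep]
    have hih := main_inv ls [PySem.Str.rstrip raw] (by simp) (by simp [render_singleton])
    rw [render_singleton] at hih
    rw [hA, hB]
    exact hih
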